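-- pv_equiv track=rewrite | github.com/metodiev/Cracking-Coding | demo/Python/reverse_characters_only.py | reverse_ignore_spaces
-- ===== SOURCE A (Python) =====
-- def reverse_ignore_spaces(s: str) -> str:
--     arr = list(s)
--     left, right = 0, len(arr) -1
--
--     while left < right:
--         if arr[left] == ' ':
--             left +=1
--         elif arr[right] == ' ':
--             right-=1
--         else:
--             arr[left], arr[right], = arr[right], arr[left]
--             left +=1
--             right -=1
--
--     return ''.join(arr)
-- ===== SOURCE B (Python) =====
-- def reverse_ignore_spaces(s: str) -> str:
--     it = iter([c for c in s if c != ' '][::-1])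
--     return ''.join(' ' if c == ' ' else next(it) for c in s)
-- ===== Notes on version B (the rewrite author's own statement) =====
-- stated objective: simpler
-- what changed: Replaces the two-pointer in-place swap loop with filter-reverse of the non-space characters followed by one forward rebuild pass that keeps spaces fixed and consumes the reversed sequence.
import Mathlib
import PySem

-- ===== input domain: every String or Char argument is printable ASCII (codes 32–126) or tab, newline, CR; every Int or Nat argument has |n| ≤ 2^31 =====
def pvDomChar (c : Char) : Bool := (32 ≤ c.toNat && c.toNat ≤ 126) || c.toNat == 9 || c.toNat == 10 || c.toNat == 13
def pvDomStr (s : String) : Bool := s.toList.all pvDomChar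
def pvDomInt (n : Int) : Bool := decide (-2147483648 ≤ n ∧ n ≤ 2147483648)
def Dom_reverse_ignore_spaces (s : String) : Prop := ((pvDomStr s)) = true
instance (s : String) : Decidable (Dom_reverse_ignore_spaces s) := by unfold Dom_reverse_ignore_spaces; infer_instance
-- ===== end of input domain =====

-- B replaces A's two-pointer in-place swap with filter-reverse of the non-space
-- characters plus a single forward rebuild pass (objective: simpler).

-- ===== PORT A =====
-- the while loop of A: left/right two-pointer swap on the char list
def loopA (arr : List Char) (left right : Int) : List Char :=
  if _h : left < right then
    if PySem.List.pyGetD arr left ' ' = ' ' then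
      loopA arr (left + 1) right
    else if PySem.List.pyGetD arr right ' ' = ' ' then
      loopA arr left (right - 1)
    else
      loopA (PySem.List.pySetD (PySem.List.pySetD arr left (PySem.List.pyGetD arr right ' '))
               right (PySem.List.pyGetD arr left ' '))
        (left + 1) (right - 1)
  else arr
termination_by (right - left).toNat
decreasing_by all_goals (simp [PySem.List.length_pySetD]; omega)

def reverse_ignore_spaces (s : String) : String :=
  let arr := s.toList
  String.mk (loopA arr 0 ((arr.length : Int) - 1))

-- ===== PORT B =====
-- the join over the generator: space stays a space, otherwise next(it);
-- the [] branch of the match (iterator exhausted) is never reached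
def fill : List Char → List Char → List Char
  | [], _ => []
  | c :: cs, ys =>
    if c = ' ' then ' ' :: fill cs ys
    else
      match ys with
      | y :: ys' => y :: fill cs ys'
      | [] => []

def reverse_ignore_spaces_alt (s : String) : String :=
  String.mk (fill s.toList ((s.toList.filter (· != ' ')).reverse))

-- ===== PRECONDITION & SPEC =====
def Spec_reverse_ignore_spaces (s : String) (out : String) : Prop := out = reverse_ignore_spaces_alt s
instance (s : String) (out : String) : Decidable (Spec_reverse_ignore_spaces s out) := by unfold Spec_reverse_ignore_spaces; infer_instance

-- ===== CLAIM (what is proved, stated in full; the proofs are below) =====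
def Claim_equal_reverse_ignore_spaces : Prop := ∀ (s : String), Dom_reverse_ignore_spaces s → Spec_reverse_ignore_spaces s (reverse_ignore_spaces s)

-- ===== LEMMAS AND PROOFS =====

lemma fill_space (cs ys : List Char) : fill (' ' :: cs) ys = ' ' :: fill cs ys := by
  simp [fill]

lemma fill_char (c : Char) (cs : List Char) (y : Char) (ys : List Char) (hc : c ≠ ' ') :
    fill (c :: cs) (y :: ys) = y :: fill cs ys := by
  simp [fill, hc]

lemma set_append_len {α : Type} (l1 l2 : List α) (a v : α) :
    (l1 ++ a :: l2).set l1.length v = l1 ++ v :: l2 := by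
  induction l1 with
  | nil => simp
  | cons x xs ih => simp [ih]

lemma getD_append_len {α : Type} [Inhabited α] (l1 l2 : List α) (a d : α) :
    (l1 ++ a :: l2).getD l1.length d = a := by
  induction l1 with
  | nil => simp
  | cons x xs ih => simpa using ih

lemma fill_append (u v ys : List Char) (h : u.countP (· != ' ') ≤ ys.length) :
    fill (u ++ v) ys = fill u ys ++ fill v (ys.drop (u.countP (· != ' '))) := by
  induction u generalizing ys with
  | nil => simp [fill]
  | cons c cs ih =>
    by_cases hc : c = ' '
    · subst hc
      rw [List.cons_append, fill_space, fill_space, ih ys (by simpa [List.countP_cons] using h)]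
      simp [List.countP_cons]
    · have hcnt : cs.countP (· != ' ') + 1 ≤ ys.length := by
        simpa [List.countP_cons, hc] using h
      cases ys with
      | nil => simp at hcnt
      | cons y ys' =>
        simp only [List.length_cons] at hcnt
        rw [List.cons_append, fill_char c _ y ys' hc, fill_char c cs y ys' hc,
            ih ys' (by omega)]
        simp [List.countP_cons, hc]

lemma fill_prefix (u ys1 ys2 : List Char) (h : u.countP (· != ' ') = ys1.length) :
    fill u (ys1 ++ ys2) = fill u ys1 := by
  induction u generalizing ys1 with
  | nil => simp [fill]
  | cons c cs ih =>
    by_cases hc : c = ' '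
    · subst hc
      rw [fill_space, fill_space, ih ys1 (by simpa [List.countP_cons] using h)]
    · have hcnt : cs.countP (· != ' ') + 1 = ys1.length := by
        simpa [List.countP_cons, hc] using h
      cases ys1 with
      | nil => simp at hcnt
      | cons y ys1' =>
        simp only [List.length_cons] at hcnt
        rw [List.cons_append, fill_char c cs y _ hc, fill_char c cs y ys1' hc,
            ih ys1' (by omega)]

-- count of non-spaces = length of the reversed filtered list
lemma count_eq_revlen (u : List Char) :
    u.countP (· != ' ') = ((u.filter (· != ' ')).reverse).length := by
  simp [List.countP_eq_length_filter]

-- the three shape equations of B's result builder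
lemma fillRev_space_cons (u : List Char) :
    fill (' ' :: u) (((' ' :: u).filter (· != ' ')).reverse)
      = ' ' :: fill u ((u.filter (· != ' ')).reverse) := by
  simp [fill_space]

lemma fillRev_space_concat (u : List Char) :
    fill (u ++ [' ']) (((u ++ [' ']).filter (· != ' ')).reverse)
      = fill u ((u.filter (· != ' ')).reverse) ++ [' '] := by
  have h1 : ((u ++ [' ']).filter (· != ' ')).reverse = (u.filter (· != ' ')).reverse := by
    simp
  rw [h1, fill_append u [' '] _ (by rw [count_eq_revlen])]
  simp [fill_space, fill]

lemma fillRev_swap (a b : Char) (u : List Char) (ha : a ≠ ' ') (hb : b ≠ ' ') :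
    fill (a :: (u ++ [b])) (((a :: (u ++ [b])).filter (· != ' ')).reverse)
      = b :: fill u ((u.filter (· != ' ')).reverse) ++ [a] := by
  have h1 : ((a :: (u ++ [b])).filter (· != ' ')).reverse
      = b :: ((u.filter (· != ' ')).reverse ++ [a]) := by
    simp [ha, hb]
  rw [h1, List.cons_append, fill_char a _ b _ ha,
      fill_append u [b] _ (by rw [count_eq_revlen]; simp),
      fill_prefix u _ [a] (by rw [count_eq_revlen])]
  have h2 : ((u.filter (· != ' ')).reverse ++ [a]).drop (u.countP (· != ' ')) = [a] := by
    rw [count_eq_revlen]; simp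
  rw [h2]
  simp [fill, hb]

lemma loopA_fill : ∀ (n : ℕ) (mid pre suf : List Char), mid.length = n →
    loopA (pre ++ mid ++ suf) (pre.length : Int) ((pre.length : Int) + mid.length - 1)
      = pre ++ fill mid ((mid.filter (· != ' ')).reverse) ++ suf := by
  intro n
  induction n using Nat.strong_induction_on with
  | _ n ih =>
    intro mid pre suf hlen
    subst hlen
    cases mid with
    | nil =>
      rw [loopA, dif_neg (by push_cast; simp)]
      simp [fill]
    | cons a rest =>
      rcases rest.eq_nil_or_concat with rfl | ⟨m, b, rfl⟩
      · rw [loopA, dif_neg (by simp)]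
        by_cases ha : a = ' ' <;> simp [fill, ha]
      · -- mid = a :: (m ++ [b]), the loop runs once
        simp only [List.concat_eq_append]
        rw [loopA, dif_pos (by push_cast; simp; omega)]
        have hga : PySem.List.pyGetD (pre ++ (a :: (m ++ [b])) ++ suf) ((pre.length : Nat) : Int) ' ' = a := by
          rw [PySem.List.pyGetD_natCast]
          have : pre ++ (a :: (m ++ [b])) ++ suf = pre ++ a :: (m ++ [b] ++ suf) := by simp
          rw [this, getD_append_len]
        have hr : ((pre.length : Int) + ((a :: (m ++ [b])).length : Int) - 1)
            = (((pre ++ a :: m).length : Nat) : Int) := by push_cast; simp; ring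
        have hgb : PySem.List.pyGetD (pre ++ (a :: (m ++ [b])) ++ suf) (((pre ++ a :: m).length : Nat) : Int) ' ' = b := by
          rw [PySem.List.pyGetD_natCast]
          have : pre ++ (a :: (m ++ [b])) ++ suf = (pre ++ a :: m) ++ b :: suf := by simp
          rw [this, getD_append_len]
        rw [hr, hga, hgb]
        by_cases ha : a = ' '
        · rw [if_pos ha]
          subst ha
          have key := ih (m ++ [b]).length (by simp) (m ++ [b]) (pre ++ [' ']) suf rfl
          have harr : (pre ++ [' ']) ++ (m ++ [b]) ++ suf = pre ++ (' ' :: (m ++ [b])) ++ suf := by simp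
          have hl : (((pre ++ [' ']).length : Nat) : Int) = (pre.length : Int) + 1 := by push_cast; simp
          have hr2 : (pre.length : Int) + 1 + ((m ++ [b]).length : Int) - 1
              = (((pre ++ ' ' :: m).length : Nat) : Int) := by push_cast; simp; ring
          rw [harr, hl, hr2] at key
          rw [key, fillRev_space_cons]
          simp
        · rw [if_neg ha]
          by_cases hb : b = ' '
          · rw [if_pos hb]
            subst hb
            have key := ih (a :: m).length (by simp) (a :: m) pre (' ' :: suf) rfl
            have harr : pre ++ (a :: m) ++ (' ' :: suf) = pre ++ (a :: (m ++ [' '])) ++ suf := by simp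
            have hr2 : (((pre ++ a :: m).length : Nat) : Int) - 1
                = (pre.length : Int) + ((a :: m).length : Int) - 1 := by push_cast; simp
            rw [harr, ← hr2] at key
            rw [key]
            have : a :: (m ++ [' ']) = (a :: m) ++ [' '] := by simp
            rw [this, fillRev_space_concat]
            simp
          · rw [if_neg hb]
            have hset : PySem.List.pySetD
                (PySem.List.pySetD (pre ++ (a :: (m ++ [b])) ++ suf) ((pre.length : Nat) : Int) b)
                (((pre ++ a :: m).length : Nat) : Int) a
                = (pre ++ [b]) ++ m ++ (a :: suf) := by
              rw [PySem.List.pySetD_natCast, PySem.List.pySetD_natCast]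
              have h1 : pre ++ (a :: (m ++ [b])) ++ suf = pre ++ a :: (m ++ [b] ++ suf) := by simp
              rw [h1, set_append_len]
              have h2 : pre ++ b :: (m ++ [b] ++ suf) = (pre ++ b :: m) ++ b :: suf := by simp
              have h3 : (pre ++ a :: m).length = (pre ++ b :: m).length := by simp
              rw [h2, h3, set_append_len]
              simp
            rw [hset]
            have key := ih m.length (by simp) m (pre ++ [b]) (a :: suf) rfl
            have hl : (((pre ++ [b]).length : Nat) : Int) = (pre.length : Int) + 1 := by push_cast; simp
            have hr2 : (pre.length : Int) + 1 + (m.length : Int) - 1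
                = (((pre ++ a :: m).length : Nat) : Int) - 1 := by push_cast; simp; ring
            rw [hl, hr2] at key
            rw [key, fillRev_swap a b m ha hb]
            simp

-- ===== VERDICT (by name: the statement is the Claim_ definition above) =====
theorem reverse_ignore_spaces_spec : Claim_equal_reverse_ignore_spaces := by
  intro s _
  unfold Spec_reverse_ignore_spaces reverse_ignore_spaces reverse_ignore_spaces_alt
  have h := loopA_fill s.toList.length s.toList [] [] rfl
  simp only [List.nil_append, List.append_nil, List.length_nil, Nat.cast_zero, zero_add] at h
  exact congrArg String.mk h
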